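-- pv_equiv track=rewrite | github.com/glad47/SISSF | ExtractProject/convertInspired.py | connect_at_with_number
-- ===== SOURCE A (Python) =====
-- def connect_at_with_number(words):
--     result = []
--     i = 0
--     while i < len(words):
--         if words[i] == "@" and i + 1 < len(words) and words[i + 1].isdigit():
--             result.append("@" + words[i + 1])
--             i += 2  # Skip the next word since it's already connected
--         else:
--             result.append(words[i])
--             i += 1
--     return result
-- ===== SOURCE B (Python) =====
-- def connect_at_with_number(words):
--     # Look-behind state machine: 'pending' remembers an unemitted "@".
--     result = []
--     pending = False
--     for w in words:
--         if pending:
--             if w.isdigit():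
--                 result.append("@" + w)
--                 pending = False
--                 continue
--             result.append("@")
--             pending = False
--         if w == "@":
--             pending = True
--         else:
--             result.append(w)
--     if pending:
--         result.append("@")
--     return result
-- ===== Notes on version B (the rewrite author's own statement) =====
-- stated objective: faster
-- what changed: Replaced the index-based while loop with look-ahead peek and i+=2 skip by a single look-behind state machine: a direct for-loop over the words with a boolean 'pending' flag that defers emitting '@' until the next word is seen (flushed after the loop); no indexing or len() calls per step.
import Mathlib
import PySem

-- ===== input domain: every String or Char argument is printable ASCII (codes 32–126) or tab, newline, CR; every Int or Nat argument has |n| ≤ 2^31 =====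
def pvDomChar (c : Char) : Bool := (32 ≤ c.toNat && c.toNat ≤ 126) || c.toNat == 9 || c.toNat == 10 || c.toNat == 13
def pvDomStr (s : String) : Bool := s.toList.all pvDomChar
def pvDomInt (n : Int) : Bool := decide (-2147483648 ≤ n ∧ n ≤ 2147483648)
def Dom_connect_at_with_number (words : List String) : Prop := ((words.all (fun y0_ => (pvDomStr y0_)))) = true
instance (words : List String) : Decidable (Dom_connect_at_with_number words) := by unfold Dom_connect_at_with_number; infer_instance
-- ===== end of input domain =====

-- B replaces A's index-based look-ahead skip by a look-behind boolean-state machine; same output, alternative decomposition.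

-- ===== PORT A =====
-- A scans by index i; when words[i] == "@" and the next word is all digits it emits "@"+next and skips both (i += 2).
def connect_at_with_number (words : List String) : List String :=
  match words with
  | [] => []
  | [w] => [w]
  | w :: next :: rest =>
    if w == "@" && PySem.Str.strIsdigit next then
      ("@" ++ next) :: connect_at_with_number rest
    else
      w :: connect_at_with_number (next :: rest)

-- ===== PORT B =====
-- B's loop body, with the pending-"@" flag as explicit state; the final flush is the [] case.
def cawnB (pending : Bool) (words : List String) : List String :=
  match words with
  | [] => if pending then ["@"] else []
  | w :: rest =>
    if pending && PySem.Str.strIsdigit w then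
      ("@" ++ w) :: cawnB false rest
    else
      (if pending then ["@"] else []) ++
        (if w == "@" then cawnB true rest else w :: cawnB false rest)

def connect_at_with_number_alt (words : List String) : List String :=
  cawnB false words

-- ===== PRECONDITION & SPEC =====
def Spec_connect_at_with_number (words : List String) (out : List String) : Prop := out = connect_at_with_number_alt words
instance (words : List String) (out : List String) : Decidable (Spec_connect_at_with_number words out) := by unfold Spec_connect_at_with_number; infer_instance

-- ===== CLAIM (what is proved, stated in full; the proofs are below) =====
def Claim_equal_connect_at_with_number : Prop := ∀ (words : List String), Dom_connect_at_with_number words → Spec_connect_at_with_number words (connect_at_with_number words)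

-- ===== LEMMAS AND PROOFS =====

-- Invariant: pending = false simulates A directly; pending = true simulates A with an "@" prepended.
theorem cawnB_inv : ∀ (l : List String),
    cawnB false l = connect_at_with_number l ∧
    cawnB true l = connect_at_with_number ("@" :: l)
  | [] => ⟨rfl, rfl⟩
  | w :: rest => by
    obtain ⟨ihF, ihT⟩ := cawnB_inv rest
    have hF : cawnB false (w :: rest) = connect_at_with_number (w :: rest) := by
      by_cases hw : w = "@"
      · subst hw
        simp [cawnB, ihT]
      · cases rest with
        | nil => simp [cawnB, connect_at_with_number, hw]
        | cons n r =>
          have e : cawnB false (w :: n :: r) = w :: cawnB false (n :: r) := by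
            simp [cawnB, hw]
          rw [e, ihF, connect_at_with_number]
          simp [hw]
    have hT : cawnB true (w :: rest) = connect_at_with_number ("@" :: w :: rest) := by
      by_cases hd : PySem.Chars.strIsdigit w.toList = true
      · simp [cawnB, connect_at_with_number, hd, ihF]
      · have h2 : connect_at_with_number ("@" :: w :: rest)
            = "@" :: connect_at_with_number (w :: rest) := by
          simp [connect_at_with_number, hd]
        rw [h2, ← hF]
        simp [cawnB, hd]
    exact ⟨hF, hT⟩

-- ===== VERDICT (by name: the statement is the Claim_ definition above) =====
theorem connect_at_with_number_spec : Claim_equal_connect_at_with_number := by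
  intro words _
  unfold Spec_connect_at_with_number connect_at_with_number_alt
  exact ((cawnB_inv words).1).symm
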